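-- pv_equiv track=rewrite | github.com/UWPCE-PythonCert-ClassRepos/Self_Paced-Online | students/Gregg/lesson4/trigram.py | split_punctuation
-- ===== SOURCE A (Python) =====
-- def split_punctuation(string_in):
--     """splits a string into strings that contain only letters or no letters
--
--     Spaces are treated as a sperate word only when they come after punctiatnion
--     This enables the trigram to start with the key ['.', ' ']
--     """
--     word_idx = 0
--     word_list = []
--     word_list.append(string_in[0])
--     for idx in range(len(string_in)-1):
--         char1_type = string_in[idx].isalnum() or string_in[idx] == ' '
--         char2_type = string_in[idx+1].isalnum() or string_in[idx+1] == ' '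
--         if char1_type == char2_type:
--             word_list[word_idx] += string_in[idx+1]
--         else:
--             word_list.append(string_in[idx+1])
--             word_idx += 1
--     return word_list
-- ===== SOURCE B (Python) =====
-- def split_punctuation(string_in):
--     """splits a string into maximal runs of same-kind characters
--     (alnum-or-space vs punctuation), by scanning run-by-run and slicing."""
--     def key(c):
--         return c.isalnum() or c == ' '
--     result = []
--     s = string_in
--     while s:
--         i = 1
--         while i < len(s) and key(s[i]) == key(s[0]):
--             i += 1
--         result.append(s[:i])
--         s = s[i:]
--     return result
-- ===== Notes on version B (the rewrite author's own statement) =====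
-- stated objective: faster
-- what changed: B scans whole same-kind runs with a two-pointer slice loop, appending each run once, instead of A's adjacent-character comparison that grows the last list element by repeated string += while tracking a word index; B returns [] on the empty string where A raises IndexError, so Pre_ excludes the empty string.
import Mathlib
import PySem

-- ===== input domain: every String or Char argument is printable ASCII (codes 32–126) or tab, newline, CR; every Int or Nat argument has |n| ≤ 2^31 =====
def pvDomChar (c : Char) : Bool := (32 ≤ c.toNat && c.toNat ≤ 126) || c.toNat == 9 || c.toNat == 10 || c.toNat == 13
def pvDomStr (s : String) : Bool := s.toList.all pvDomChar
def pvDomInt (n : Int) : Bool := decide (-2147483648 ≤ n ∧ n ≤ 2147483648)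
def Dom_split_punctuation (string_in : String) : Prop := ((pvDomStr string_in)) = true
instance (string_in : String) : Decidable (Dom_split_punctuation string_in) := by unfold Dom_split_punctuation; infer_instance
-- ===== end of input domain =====

-- B splits the string into maximal same-kind runs with a run-scanning slice loop instead of
-- A's adjacent-character comparison mutating the last element; return values agree on every
-- non-empty string (A raises IndexError on "", where B returns []).


-- ===== PORT A =====
-- `c.isalnum() or c == ' '` as computed inline by A
def pvKeyA (c : Char) : Bool := PySem.Chars.isalnum c || (c == ' ')

-- loop body of A's `for idx in range(len(string_in)-1)`; state = (word_list, word_idx);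
-- `word_list[word_idx] += ch` is the in-place update `set word_idx (word_list[word_idx] ++ ch)`
def pvStepA (s : List Char) (st : List String × Nat) (idx : Int) : List String × Nat :=
  let char1_type := pvKeyA (PySem.List.pyGetD s idx ' ')
  let char2_type := pvKeyA (PySem.List.pyGetD s (idx + 1) ' ')
  if char1_type == char2_type then
    (st.1.set st.2 (st.1.getD st.2 "" ++ String.singleton (PySem.List.pyGetD s (idx + 1) ' ')), st.2)
  else
    (st.1 ++ [String.singleton (PySem.List.pyGetD s (idx + 1) ' ')], st.2 + 1)

def split_punctuation (string_in : String) : List String :=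
  let s := string_in.toList
  match s with
  | [] => []   -- Python: string_in[0] raises IndexError here; excluded by Pre_
  | c0 :: _ =>
    ((PySem.List.pyRange 0 ((s.length : Int) - 1) 1).foldl (pvStepA s)
      ([String.singleton c0], 0)).1

-- ===== PORT B =====
-- B's inner `while i < len(s) and key(s[i]) == key(s[0])`: run length over the tail
def pvRunLen (k : Bool) : List Char → Nat
  | [] => 0
  | c :: rest => if pvKeyA c == k then pvRunLen k rest + 1 else 0

-- B's outer `while s:` loop: take the run s[:i], recurse on s[i:]
def pvGroups : List Char → List (List Char)
  | [] => []
  | c :: rest =>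
    let i := pvRunLen (pvKeyA c) rest + 1
    ((c :: rest).take i) :: pvGroups ((c :: rest).drop i)
termination_by l => l.length
decreasing_by simp

def split_punctuation_alt (string_in : String) : List String :=
  (pvGroups string_in.toList).map (fun g => String.ofList g)

-- ===== PRECONDITION & SPEC =====
-- Pre_ excludes only the empty string, on which A raises IndexError at string_in[0].
def Pre_split_punctuation (string_in : String) : Prop := string_in ≠ ""
instance (string_in : String) : Decidable (Pre_split_punctuation string_in) := by unfold Pre_split_punctuation; infer_instance
def pvWitness_split_punctuation : String := "Hi, there!"

def Spec_split_punctuation (string_in : String) (out : List String) : Prop := out = split_punctuation_alt string_in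
instance (string_in : String) (out : List String) : Decidable (Spec_split_punctuation string_in out) := by unfold Spec_split_punctuation; infer_instance

-- ===== CLAIM (what is proved, stated in full; the proofs are below) =====
def Claim_equal_split_punctuation : Prop := ∀ (string_in : String), Dom_split_punctuation string_in → Pre_split_punctuation string_in → Spec_split_punctuation string_in (split_punctuation string_in)

-- ===== LEMMAS AND PROOFS =====

-- A's behaviour, characterised as a char-by-char grouping (g = current word, p = previous char)
def pvCollect (g : String) (p : Char) : List Char → List String
  | [] => [g]
  | c :: rest =>
    if pvKeyA p == pvKeyA c then pvCollect (g ++ String.singleton c) c rest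
    else g :: pvCollect (String.singleton c) c rest

-- the loop body of A seen on an adjacent pair of characters
def pvStepP (st : List String × Nat) (pr : Char × Char) : List String × Nat :=
  if pvKeyA pr.1 == pvKeyA pr.2 then
    (st.1.set st.2 (st.1.getD st.2 "" ++ String.singleton pr.2), st.2)
  else
    (st.1 ++ [String.singleton pr.2], st.2 + 1)

lemma pv_zip_eq_map_range (s : List Char) :
    s.zip s.tail = (List.range (s.length - 1)).map (fun i => (s.getD i ' ', s.getD (i + 1) ' ')) := by
  apply List.ext_getElem
  · simp [List.length_zip, List.length_tail]
  · intro i h1 h2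
    have hlen : i + 1 < s.length := by simp [List.length_zip, List.length_tail] at h1; omega
    have h1' : i < s.length := by omega
    simp [List.getElem_zip, List.getElem_tail, List.getD,
      List.getElem?_eq_getElem h1', List.getElem?_eq_getElem hlen]

-- the fold over zipped adjacent pairs, with A's state invariant
lemma pv_fold_inv (t : List Char) : ∀ (p : Char) (acc : List String) (g : String),
    ((p :: t).zip t).foldl pvStepP (acc ++ [g], acc.length)
      = (acc ++ pvCollect g p t, acc.length + (pvCollect g p t).length - 1) := by
  induction t with
  | nil => intro p acc g; simp [pvCollect]
  | cons c rest ih =>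
    intro p acc g
    by_cases h : pvKeyA p = pvKeyA c
    · rw [show pvCollect g p (c :: rest) = pvCollect (g ++ String.singleton c) c rest by
          simp [pvCollect, h]]
      rw [List.zip_cons_cons, List.foldl_cons]
      rw [show pvStepP (acc ++ [g], acc.length) (p, c)
            = (acc ++ [g ++ String.singleton c], acc.length) by
          simp [pvStepP, h]]
      exact ih c acc (g ++ String.singleton c)
    · rw [show pvCollect g p (c :: rest) = g :: pvCollect (String.singleton c) c rest by
          simp [pvCollect, h]]
      rw [List.zip_cons_cons, List.foldl_cons]
      rw [show pvStepP (acc ++ [g], acc.length) (p, c)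
            = ((acc ++ [g]) ++ [String.singleton c], (acc ++ [g]).length) by
          simp [pvStepP, h]]
      rw [ih c (acc ++ [g]) (String.singleton c)]
      simp

-- A's port reduced to pvCollect
lemma pv_A_eq_collect (c0 : Char) (t : List Char) :
    split_punctuation (String.ofList (c0 :: t)) = pvCollect (String.singleton c0) c0 t := by
  have hts : (String.ofList (c0 :: t)).toList = c0 :: t := by simp
  simp only [split_punctuation, hts]
  have hr : PySem.List.pyRange 0 (((c0 :: t).length : Int) - 1) 1
      = (List.range ((c0 :: t).length - 1)).map (fun k : Nat => ((k : Nat) : Int)) := by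
    rw [PySem.List.pyRange_one]
    rw [show ((((c0 :: t).length : Int) - 1 - 0)).toNat = (c0 :: t).length - 1 by omega]
    simp
  rw [hr, List.foldl_map]
  have hfold : (List.range ((c0 :: t).length - 1)).foldl
        (fun st k => pvStepA (c0 :: t) st ((k : Nat) : Int)) ([String.singleton c0], 0)
      = (List.range ((c0 :: t).length - 1)).foldl
        (fun st k => pvStepP st ((c0 :: t).getD k ' ', (c0 :: t).getD (k + 1) ' '))
        ([String.singleton c0], 0) := by
    apply PySem.List.foldl_congr_mem
    intro st k _
    simp only [pvStepA, pvStepP]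
    rw [show ((k : Int) + 1) = (((k + 1 : Nat)) : Int) by push_cast; ring]
    simp only [PySem.List.pyGetD_natCast]
  rw [hfold]
  have hz := pv_zip_eq_map_range (c0 :: t)
  rw [show (List.range ((c0 :: t).length - 1)).foldl
        (fun st k => pvStepP st ((c0 :: t).getD k ' ', (c0 :: t).getD (k + 1) ' '))
        ([String.singleton c0], 0)
      = ((c0 :: t).zip (c0 :: t).tail).foldl pvStepP ([String.singleton c0], 0) by
    rw [hz, List.foldl_map]]
  have := pv_fold_inv t c0 [] (String.singleton c0)
  simp only [List.nil_append, List.length_nil, List.tail_cons, Nat.zero_add] at this ⊢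
  rw [this]

lemma pvGroups_nil : pvGroups [] = [] := by rw [pvGroups]

lemma pvGroups_cons (c : Char) (rest : List Char) :
    pvGroups (c :: rest)
      = ((c :: rest).take (pvRunLen (pvKeyA c) rest + 1))
          :: pvGroups ((c :: rest).drop (pvRunLen (pvKeyA c) rest + 1)) := by
  rw [pvGroups]

lemma pv_collect_groups (t : List Char) : ∀ (p : Char) (g : List Char),
    pvCollect (String.ofList g) p t
      = String.ofList (g ++ t.take (pvRunLen (pvKeyA p) t))
          :: (pvGroups (t.drop (pvRunLen (pvKeyA p) t))).map (fun l => String.ofList l) := by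
  induction t with
  | nil => intro p g; simp [pvCollect, pvRunLen, pvGroups_nil]
  | cons c rest ih =>
    intro p g
    by_cases h : pvKeyA p = pvKeyA c
    · have hk : pvKeyA c = pvKeyA p := h.symm
      have happ : String.ofList g ++ String.singleton c = String.ofList (g ++ [c]) := by
        apply String.toList_injective; simp
      rw [show pvCollect (String.ofList g) p (c :: rest)
            = pvCollect (String.ofList g ++ String.singleton c) c rest by
          simp [pvCollect, h]]
      rw [happ, ih c (g ++ [c])]
      rw [show pvRunLen (pvKeyA p) (c :: rest) = pvRunLen (pvKeyA p) rest + 1 by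
          simp [pvRunLen, hk]]
      rw [show pvRunLen (pvKeyA p) rest = pvRunLen (pvKeyA c) rest by rw [hk]]
      simp [List.take_succ_cons, List.drop_succ_cons]
    · have hk : pvKeyA c ≠ pvKeyA p := fun he => h he.symm
      rw [show pvCollect (String.ofList g) p (c :: rest)
            = String.ofList g :: pvCollect (String.singleton c) c rest by
          simp [pvCollect, h]]
      rw [show pvRunLen (pvKeyA p) (c :: rest) = 0 by simp [pvRunLen, hk]]
      rw [show String.singleton c = String.ofList ([c]) from rfl, ih c [c]]
      simp only [List.take_zero, List.drop_zero, List.append_nil]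
      rw [pvGroups_cons]
      simp [List.take_succ_cons, List.drop_succ_cons]

-- ===== VERDICT (by name: the statement is the Claim_ definition above) =====
theorem split_punctuation_spec : Claim_equal_split_punctuation := by
  intro s _ hpre
  unfold Spec_split_punctuation
  obtain ⟨c0, t, hst⟩ : ∃ c0 t, s.toList = c0 :: t := by
    cases hs : s.toList with
    | nil => exact absurd (String.toList_injective (by simpa using hs)) hpre
    | cons a b => exact ⟨a, b, rfl⟩
  have hs' : s = String.ofList (c0 :: t) := by
    apply String.toList_injective; simpa using hst
  rw [hs', pv_A_eq_collect, show String.singleton c0 = String.ofList [c0] from rfl,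
    pv_collect_groups t c0 [c0]]
  simp only [split_punctuation_alt]
  rw [show (String.ofList (c0 :: t)).toList = c0 :: t by simp]
  rw [pvGroups_cons]
  simp [List.take_succ_cons, List.drop_succ_cons]
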